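-- pv_equiv track=rewrite | github.com/d-r-w/vico | python/streaming_inference_service.py | scan_tool_call_tags
-- ===== SOURCE A (Python) =====
-- from typing import Any, Callable, Deque, Dict, Iterable, List, NamedTuple, Optional, Set, Tuple, Union, cast
--
-- class ToolCallTagScan(NamedTuple):
--     has_open: bool
--     has_close: bool
--     has_function_call: bool
--
-- def scan_tool_call_tags(text: str) -> ToolCallTagScan:
--     """Scan text for <tool_call> tags and function-style calls."""
--     open_tag = "<tool_call>"
--     close_tag = "</tool_call>"
--     open_len = len(open_tag)
--     has_function_call = "<function=" in text.lower()
--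
--     has_open = False
--     index = 0
--     limit = len(text)
--
--     while index < limit:
--         if not has_open and text.startswith(open_tag, index):
--             has_open = True
--             index += open_len
--             continue
--         if text.startswith(close_tag, index):
--             return ToolCallTagScan(has_open, True, has_function_call)
--         index += 1
--
--     return ToolCallTagScan(has_open, False, has_function_call)
-- ===== SOURCE B (Python) =====
-- from typing import NamedTuple
--
-- class ToolCallTagScan(NamedTuple):
--     has_open: bool
--     has_close: bool
--     has_function_call: bool
--
-- def scan_tool_call_tags(text: str) -> ToolCallTagScan:
--     """Scan text for <tool_call> tags and function-style calls."""
--     has_function_call = "<function=" in text.lower()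
--     open_pos = text.find("<tool_call>")
--     close_pos = text.find("</tool_call>")
--     has_close = close_pos != -1
--     has_open = open_pos != -1 and (close_pos == -1 or open_pos < close_pos)
--     return ToolCallTagScan(has_open, has_close, has_function_call)
-- ===== Notes on version B (the rewrite author's own statement) =====
-- stated objective: simpler
-- what changed: Replaces the stateful character-by-character while loop (with tag-skipping and mid-loop return) by two independent str.find searches plus a position comparison open_pos < close_pos.
import Mathlib
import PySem

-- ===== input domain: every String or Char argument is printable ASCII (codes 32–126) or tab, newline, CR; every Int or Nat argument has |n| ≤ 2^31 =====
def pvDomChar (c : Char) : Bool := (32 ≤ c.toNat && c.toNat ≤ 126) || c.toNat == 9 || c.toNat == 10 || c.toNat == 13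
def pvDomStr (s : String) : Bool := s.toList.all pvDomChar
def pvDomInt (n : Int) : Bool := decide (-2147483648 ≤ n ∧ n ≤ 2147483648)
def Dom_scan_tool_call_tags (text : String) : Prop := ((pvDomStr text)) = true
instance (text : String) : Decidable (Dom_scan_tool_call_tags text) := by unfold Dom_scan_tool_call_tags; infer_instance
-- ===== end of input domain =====

-- B replaces A's stateful character-by-character while loop by two independent find
-- searches plus a position comparison (objective: simpler).

-- ===== PORT A =====
-- the two tag constants of A, as character lists
def pvOpenTag : List Char := "<tool_call>".toList
def pvCloseTag : List Char := "</tool_call>".toList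

-- A's while loop: recursion over the remaining suffix of the text, carrying has_open;
-- text.startswith(tag, index) is PySem.Chars.startswith on the current suffix, and
-- 'index += open_len; continue' drops the 11 matched characters (here: tail + drop 10).
def pvScanLoopA (l : List Char) (has_open : Bool) : Bool × Bool :=
  match l with
  | [] => (has_open, false)
  | c :: cs =>
    if !has_open && PySem.Chars.startswith (c :: cs) pvOpenTag then
      pvScanLoopA (cs.drop 10) true
    else if PySem.Chars.startswith (c :: cs) pvCloseTag then
      (has_open, true)
    else
      pvScanLoopA cs has_open
termination_by l.length
decreasing_by
  · simp only [List.length_cons, List.length_drop]; omega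
  · simp

def scan_tool_call_tags (text : String) : Bool × Bool × Bool :=
  let has_function_call := PySem.Str.isIn "<function=" (PySem.Str.lower text)
  let r := pvScanLoopA text.toList false
  (r.1, r.2, has_function_call)

-- ===== PORT B =====
def scan_tool_call_tags_alt (text : String) : Bool × Bool × Bool :=
  let has_function_call := PySem.Str.isIn "<function=" (PySem.Str.lower text)
  let open_pos := PySem.Str.find text "<tool_call>"
  let close_pos := PySem.Str.find text "</tool_call>"
  let has_close := close_pos != -1
  let has_open := open_pos != -1 && (close_pos == -1 || decide (open_pos < close_pos))
  (has_open, has_close, has_function_call)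

-- ===== PRECONDITION & SPEC =====
def Spec_scan_tool_call_tags (text : String) (out : Bool × Bool × Bool) : Prop := out = scan_tool_call_tags_alt text
instance (text : String) (out : Bool × Bool × Bool) : Decidable (Spec_scan_tool_call_tags text out) := by unfold Spec_scan_tool_call_tags; infer_instance

-- ===== CLAIM (what is proved, stated in full; the proofs are below) =====
def Claim_equal_scan_tool_call_tags : Prop := ∀ (text : String), Dom_scan_tool_call_tags text → Spec_scan_tool_call_tags text (scan_tool_call_tags text)

-- ===== LEMMAS AND PROOFS =====

-- a close tag never starts at offset < 11 inside a matched open tag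
theorem pv_no_close_in_open {l : List Char} (h : pvOpenTag <+: l) :
    ∀ j, j < 11 → ¬ pvCloseTag <+: l.drop j := by
  obtain ⟨t, rfl⟩ := h
  intro j hj hc
  rw [List.drop_append_of_le_length (by simp [pvOpenTag]; omega)] at hc
  obtain ⟨u, hu⟩ := hc
  have hlen : (pvOpenTag.drop j).length ≤ pvCloseTag.length := by
    simp [pvOpenTag, pvCloseTag]; omega
  have : (pvOpenTag.drop j ++ t).take (pvOpenTag.drop j).length = pvOpenTag.drop j :=
    List.take_left
  rw [← hu, List.take_append_of_le_length hlen] at this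
  have : pvOpenTag.drop j <+: pvCloseTag := this ▸ List.take_prefix _ _
  interval_cases j <;> revert this <;> decide

-- once has_open is true, the loop only searches for the close tag
theorem pv_loopA_true (l : List Char) :
    pvScanLoopA l true = (true, decide (pvCloseTag <:+: l)) := by
  induction l with
  | nil => simp [pvScanLoopA]; decide
  | cons c cs ih =>
    rw [pvScanLoopA]
    simp only [Bool.not_true, Bool.false_and]
    by_cases h : pvCloseTag <+: (c :: cs)
    · rw [if_pos ((PySem.Chars.startswith_iff _ _).mpr h)]
      simp [List.infix_cons_iff, h]
    · rw [if_neg (fun hb => h ((PySem.Chars.startswith_iff _ _).mp hb)), ih]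
      simp [List.infix_cons_iff, h]

-- "sub occurs in l" = "sub is a prefix of some suffix of l"
theorem pv_infix_iff (a l : List Char) : a <:+: l ↔ ∃ j, a <+: l.drop j := by
  rw [← PySem.Chars.isIn_iff_infix, ← PySem.Chars.exists_prefix_drop_iff_isIn]

-- skipping a matched open tag skips no close tag
theorem pv_skip_close {c : Char} {cs : List Char} (h : pvOpenTag <+: (c :: cs)) :
    (pvCloseTag <:+: (c :: cs)) ↔ pvCloseTag <:+: cs.drop 10 := by
  rw [pv_infix_iff, pv_infix_iff]
  constructor
  · rintro ⟨j, hj⟩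
    by_cases hlt : j < 11
    · exact absurd hj (pv_no_close_in_open h j hlt)
    · refine ⟨j - 11, ?_⟩
      rw [show j = (j - 1) + 1 by omega, List.drop_succ_cons] at hj
      rw [List.drop_drop, show 10 + (j - 11) = j - 1 by omega]
      exact hj
  · rintro ⟨j, hj⟩
    refine ⟨j + 11, ?_⟩
    rw [show j + 11 = (10 + j) + 1 by omega, List.drop_succ_cons, ← List.drop_drop]
    exact hj

-- the loop's second component is always "the close tag occurs somewhere"
theorem pv_loopA_snd (l : List Char) (ho : Bool) :
    (pvScanLoopA l ho).2 = decide (pvCloseTag <:+: l) := by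
  induction l, ho using pvScanLoopA.induct with
  | case1 ho => simp [pvScanLoopA]; decide
  | case2 ho c cs hcond ih =>
    rw [pvScanLoopA, if_pos hcond, pv_loopA_true]
    have hop : pvOpenTag <+: (c :: cs) :=
      (PySem.Chars.startswith_iff _ _).mp (by exact (Bool.and_eq_true _ _ ▸ hcond).2)
    simp [pv_skip_close hop]
  | case3 ho c cs hcond hclose =>
    rw [pvScanLoopA, if_neg hcond, if_pos hclose]
    have : pvCloseTag <+: (c :: cs) := (PySem.Chars.startswith_iff _ _).mp hclose
    simp [List.infix_cons_iff, this]
  | case4 ho c cs hcond hclose ih =>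
    rw [pvScanLoopA, if_neg hcond, if_neg hclose, ih]
    have : ¬ pvCloseTag <+: (c :: cs) :=
      fun hb => by simp [(PySem.Chars.startswith_iff _ _).mpr hb] at hclose
    simp [List.infix_cons_iff, this]

-- if the open tag never occurs, has_open stays false
theorem pv_loopA_fst_no_open {l : List Char} (h : ¬ pvOpenTag <:+: l) :
    (pvScanLoopA l false).1 = false := by
  induction l with
  | nil => simp [pvScanLoopA]
  | cons c cs ih =>
    rw [pvScanLoopA]
    have hop : ¬ pvOpenTag <+: (c :: cs) := fun hp => h hp.isInfix
    rw [if_neg (by simp [PySem.Chars.startswith_iff, hop])]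
    split
    · rfl
    · exact ih (fun hi => h ((List.infix_cons_iff).mpr (Or.inr hi)))

-- an open tag at position p with no close tag at any position ≤ p: has_open becomes true
theorem pv_loopA_fst_open_first (p : Nat) (l : List Char)
    (ho : pvOpenTag <+: l.drop p) (hc : ∀ i, i ≤ p → ¬ pvCloseTag <+: l.drop i) :
    (pvScanLoopA l false).1 = true := by
  induction l generalizing p with
  | nil => rw [List.drop_nil] at ho; exact absurd (List.prefix_nil.mp ho) (by decide)
  | cons c cs ih =>
    rw [pvScanLoopA]
    by_cases hop : pvOpenTag <+: (c :: cs)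
    · rw [if_pos (by simp [PySem.Chars.startswith_iff, hop]), pv_loopA_true]
    · rw [if_neg (by simp [PySem.Chars.startswith_iff, hop]),
        if_neg (by simp [PySem.Chars.startswith_iff]; exact hc 0 (Nat.zero_le _))]
      match p with
      | 0 => exact absurd ho hop
      | q + 1 =>
        exact ih q ho (fun i hi => hc (i + 1) (by omega))

-- a close tag at position q with no open tag at any position ≤ q: has_open stays false
theorem pv_loopA_fst_close_first (q : Nat) (l : List Char)
    (hc : pvCloseTag <+: l.drop q) (ho : ∀ i, i ≤ q → ¬ pvOpenTag <+: l.drop i) :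
    (pvScanLoopA l false).1 = false := by
  induction l generalizing q with
  | nil => rw [List.drop_nil] at hc; exact absurd (List.prefix_nil.mp hc) (by decide)
  | cons c cs ih =>
    rw [pvScanLoopA]
    rw [if_neg (by simp [PySem.Chars.startswith_iff]; exact ho 0 (Nat.zero_le _))]
    by_cases hcl : pvCloseTag <+: (c :: cs)
    · rw [if_pos (by simp [PySem.Chars.startswith_iff, hcl])]
    · rw [if_neg (by simp [PySem.Chars.startswith_iff, hcl])]
      match q with
      | 0 => exact absurd hc hcl
      | r + 1 =>
        exact ih r hc (fun i hi => ho (i + 1) (by omega))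

-- the two ports agree on every string
theorem pv_final (text : String) :
    scan_tool_call_tags text = scan_tool_call_tags_alt text := by
  unfold scan_tool_call_tags scan_tool_call_tags_alt
  simp only [PySem.Str.find_eq]
  have hO : "<tool_call>".toList = pvOpenTag := rfl
  have hC : "</tool_call>".toList = pvCloseTag := rfl
  simp only [hO, hC]
  set tl := text.toList with htl
  set op := PySem.Chars.find tl pvOpenTag with hop
  set cp := PySem.Chars.find tl pvCloseTag with hcp
  have hsnd : (pvScanLoopA tl false).2 = (cp != -1) := by
    rw [pv_loopA_snd]
    by_cases h : pvCloseTag <:+: tl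
    · have := (PySem.Chars.find_ne_neg_one_iff tl pvCloseTag).mpr h
      simp only [h, decide_true]
      exact (bne_iff_ne.mpr this).symm
    · have := (PySem.Chars.find_eq_neg_one_iff tl pvCloseTag).mpr h
      simp only [h, decide_false]
      exact (bne_eq_false_iff_eq.mpr this).symm
  have hfst : (pvScanLoopA tl false).1
      = (op != -1 && (cp == -1 || decide (op < cp))) := by
    by_cases hOin : pvOpenTag <:+: tl
    · have hopne : op ≠ -1 := (PySem.Chars.find_ne_neg_one_iff tl pvOpenTag).mpr hOin
      have hop0 : 0 ≤ op := (PySem.Chars.find_nonneg_iff tl pvOpenTag).mpr hOin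
      obtain ⟨hOpre, hOmin⟩ := PySem.Chars.find_spec (s := tl) (sub := pvOpenTag) hop0
      by_cases hCin : pvCloseTag <:+: tl
      · have hcp0 : 0 ≤ cp := (PySem.Chars.find_nonneg_iff tl pvCloseTag).mpr hCin
        obtain ⟨hCpre, hCmin⟩ := PySem.Chars.find_spec (s := tl) (sub := pvCloseTag) hcp0
        have hne : op.toNat ≠ cp.toNat := by
          intro he
          rcases List.prefix_or_prefix_of_prefix hOpre (he ▸ hCpre) with h | h
          · revert h; decide
          · revert h; decide
        have hcpne : cp ≠ -1 := (PySem.Chars.find_ne_neg_one_iff tl pvCloseTag).mpr hCin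
        by_cases hlt : op.toNat < cp.toNat
        · have : op < cp := by omega
          rw [pv_loopA_fst_open_first op.toNat tl hOpre
            (fun i hi => hCmin i (by omega))]
          simp [hopne, this]
        · have hqp : cp.toNat < op.toNat := by omega
          have : ¬ op < cp := by omega
          rw [pv_loopA_fst_close_first cp.toNat tl hCpre
            (fun i hi => hOmin i (by omega))]
          simp [hcpne, this]
      · have hcpe : cp = -1 := (PySem.Chars.find_eq_neg_one_iff tl pvCloseTag).mpr hCin
        rw [pv_loopA_fst_open_first op.toNat tl hOpre
          (fun i _ => fun hpre => hCin ((pv_infix_iff _ _).mpr ⟨i, hpre⟩))]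
        simp [hopne, hcpe]
    · have : op = -1 := (PySem.Chars.find_eq_neg_one_iff tl pvOpenTag).mpr hOin
      rw [pv_loopA_fst_no_open hOin]
      simp [this]
  simp only [hsnd, hfst]

-- ===== VERDICT (by name: the statement is the Claim_ definition above) =====
theorem scan_tool_call_tags_spec : Claim_equal_scan_tool_call_tags := by
  intro text _
  unfold Spec_scan_tool_call_tags
  exact pv_final text
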